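-- pv_equiv track=rewrite | github.com/BjornRo/advent_of_code | 2016/day07.py | listenor
-- ===== SOURCE A (Python) =====
-- def listenor(sq: tuple[str, ...], sqrt: tuple[str, ...]) -> bool:
--     for s in sq:
--         for i in range(len(s) - 2):
--             a, b, c = s[i : i + 3]
--             if a == c and a != b:
--                 t = b + a + b
--                 for ss in sqrt:
--                     if t in ss:
--                         return True
--     return False
-- ===== SOURCE B (Python) =====
-- def listenor(sq: tuple[str, ...], sqrt: tuple[str, ...]) -> bool:
--     # Pass 1: collect the BAB target of every ABA window of sq, walking windows via zip.
--     targets = set()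
--     for s in sq:
--         for a, b, c in zip(s, s[1:], s[2:]):
--             if a == c and a != b:
--                 targets.add(b + a + b)
--     # Pass 2: one scan of sqrt's 3-char windows against the index.
--     return any(ss[i : i + 3] in targets for ss in sqrt for i in range(len(ss) - 2))
-- ===== Notes on version B (the rewrite author's own statement) =====
-- stated objective: alternative
-- what changed: Instead of re-scanning every string of sqrt (substring search) for each ABA found in sq, B builds the set of all BAB targets in one zip-based pass over sq and then makes one separate top-level pass over the 3-char windows of sqrt testing set membership; it trades A's early exit for a precomputed index.
import Mathlib
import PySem

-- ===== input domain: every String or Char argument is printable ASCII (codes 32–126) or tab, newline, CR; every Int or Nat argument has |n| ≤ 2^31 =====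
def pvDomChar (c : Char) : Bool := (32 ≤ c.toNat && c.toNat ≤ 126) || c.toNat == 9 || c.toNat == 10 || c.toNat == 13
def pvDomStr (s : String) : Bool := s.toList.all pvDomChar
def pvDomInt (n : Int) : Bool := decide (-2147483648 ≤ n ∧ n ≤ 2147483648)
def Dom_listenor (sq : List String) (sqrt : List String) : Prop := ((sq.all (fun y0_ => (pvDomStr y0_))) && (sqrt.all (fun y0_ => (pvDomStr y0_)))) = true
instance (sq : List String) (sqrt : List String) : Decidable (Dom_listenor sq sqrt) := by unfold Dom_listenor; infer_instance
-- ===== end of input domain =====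

-- B replaces A's re-scan of all of sqrt for every ABA window of sq by one indexing pass
-- (zip over shifted strings) collecting all BAB targets in a set, then one separate pass
-- over sqrt's 3-char windows.

-- ===== PORT A =====
def listenor (sq : List String) (sqrt : List String) : Bool :=
  -- the early 'return True' makes each Python loop an 'any'
  sq.any (fun s =>
    (PySem.List.pyRange 0 (PySem.Str.len s - 2) 1).any (fun i =>
      match (PySem.Str.slice s (some i) (some (i + 3))).toList with
      | [a, b, c] =>      -- a, b, c = s[i : i + 3]  (always 3 chars for i in range(len(s)-2))
        if a == c && !(a == b) then
          sqrt.any (fun ss => PySem.Str.isIn (String.ofList [b, a, b]) ss)  -- t = b+a+b; t in ss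
        else false
      | _ => false))      -- unreachable

-- ===== PORT B =====
def listenor_alt (sq : List String) (sqrt : List String) : Bool :=
  -- pass 1: 'for a, b, c in zip(s, s[1:], s[2:])' — the zip's triples as nested pairs
  -- p = ((a, b), c); the set comprehension-style add is the fold's conditional add
  let targets : PySem.Set String :=
    sq.foldl (fun T s =>
      ((s.toList.zip (PySem.Str.slice s (some 1) none).toList).zip
          (PySem.Str.slice s (some 2) none).toList).foldl
        (fun T p =>
          if p.1.1 == p.2 && !(p.1.1 == p.1.2) then
            T.add (String.ofList [p.1.2, p.1.1, p.1.2])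
          else T) T) PySem.Set.empty
  -- pass 2: any 3-char window of sqrt that is a collected target
  sqrt.any (fun ss =>
    (PySem.List.pyRange 0 (PySem.Str.len ss - 2) 1).any (fun i =>
      targets.contains (PySem.Str.slice ss (some i) (some (i + 3)))))

-- ===== PRECONDITION & SPEC =====
def Spec_listenor (sq : List String) (sqrt : List String) (out : Bool) : Prop := out = listenor_alt sq sqrt
instance (sq : List String) (sqrt : List String) (out : Bool) : Decidable (Spec_listenor sq sqrt out) := by unfold Spec_listenor; infer_instance

-- ===== CLAIM (what is proved, stated in full; the proofs are below) =====
def Claim_equal_listenor : Prop := ∀ (sq : List String) (sqrt : List String), Dom_listenor sq sqrt → Spec_listenor sq sqrt (listenor sq sqrt)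

-- ===== LEMMAS AND PROOFS =====

-- the boolean A tests at window i of s, and the BAB target it builds there
def pvCond (s : String) (i : Int) : Bool :=
  match (PySem.Str.slice s (some i) (some (i + 3))).toList with
  | [a, b, c] => a == c && !(a == b)
  | _ => false

def pvTgt (s : String) (i : Int) : String :=
  match (PySem.Str.slice s (some i) (some (i + 3))).toList with
  | [a, b, _] => String.ofList [b, a, b]
  | _ => ""

theorem length_pvTgt (s : String) (i : Int) (h : pvCond s i = true) :
    (pvTgt s i).toList.length = 3 := by
  unfold pvCond at h
  unfold pvTgt
  rcases hl : (PySem.Str.slice s (some i) (some (i + 3))).toList with _ | ⟨a, _ | ⟨b, _ | ⟨c, _ | ⟨d, tl⟩⟩⟩⟩ <;>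
    simp [hl] at h ⊢

theorem A_true_iff (sq sqrt : List String) :
    listenor sq sqrt = true ↔
      ∃ s ∈ sq, ∃ i ∈ PySem.List.pyRange 0 (PySem.Str.len s - 2) 1,
        pvCond s i = true ∧ ∃ ss ∈ sqrt, PySem.Str.isIn (pvTgt s i) ss = true := by
  unfold listenor
  simp only [List.any_eq_true]
  refine exists_congr fun s => and_congr_right fun _ =>
    exists_congr fun i => and_congr_right fun _ => ?_
  rcases hl : (PySem.Str.slice s (some i) (some (i + 3))).toList with _ | ⟨a, _ | ⟨b, _ | ⟨c, _ | ⟨d, tl⟩⟩⟩⟩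
  · simp [pvCond, hl]
  · simp [pvCond, hl]
  · simp [pvCond, hl]
  · simp only [pvCond, pvTgt, hl]
    split_ifs with hc
    · simp [hc, List.any_eq_true]
    · simp [hc]
  · simp [pvCond, hl]

theorem pv_mem_foldl_addIf {ι : Type} (r : List ι) (step : PySem.Set String → ι → PySem.Set String)
    (q : ι → Bool) (f : ι → String)
    (hstep : ∀ T i, step T i = if q i = true then PySem.Set.add T (f i) else T)
    (T : PySem.Set String) (t : String) :
    t ∈ r.foldl step T ↔ t ∈ T ∨ ∃ i ∈ r, q i = true ∧ f i = t := by
  induction r generalizing T with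
  | nil => simp
  | cons x xs ih =>
    rw [List.foldl_cons, ih, hstep]
    simp only [List.exists_mem_cons_iff]
    by_cases hq : q x = true
    · rw [if_pos hq]
      simp only [PySem.Set.mem_add]
      constructor
      · rintro (⟨h | h⟩ | h)
        · exact Or.inl h
        · exact Or.inr (Or.inl ⟨hq, h.symm⟩)
        · exact Or.inr (Or.inr h)
      · rintro (h | h | h)
        · exact Or.inl (Or.inl h)
        · exact Or.inl (Or.inr h.2.symm)
        · exact Or.inr h
    · rw [if_neg hq]
      constructor
      · rintro (h | h)
        · exact Or.inl h
        · exact Or.inr (Or.inr h)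
      · rintro (h | h | h)
        · exact Or.inl h
        · exact absurd h.1 hq
        · exact Or.inr h

theorem pv_mem_foldl_union {σ : Type} (r : List σ) (g : PySem.Set String → σ → PySem.Set String)
    (P : σ → String → Prop)
    (hg : ∀ T s t, t ∈ g T s ↔ t ∈ T ∨ P s t) (T : PySem.Set String) (t : String) :
    t ∈ r.foldl g T ↔ t ∈ T ∨ ∃ s ∈ r, P s t := by
  induction r generalizing T with
  | nil => simp
  | cons x xs ih =>
    rw [List.foldl_cons, ih]
    simp only [List.exists_mem_cons_iff, hg]
    tauto

theorem window_eq (L : List Char) (k : Nat) (hk : k + 2 < L.length) :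
    PySem.List.slice L (some (k : Int)) (some ((k : Int) + 3)) =
      [L[k]'(by omega), L[k+1]'(by omega), L[k+2]'(by omega)] := by
  rw [PySem.List.slice_toNat _ (by positivity) (by positivity)]
  have h1 : ((k : Int)).toNat = k := Int.toNat_natCast _
  have h2 : ((k : Int) + 3).toNat = k + 3 := by omega
  rw [h1, h2]
  have h3 : k + 3 - k = 3 := by omega
  rw [h3]
  apply List.ext_getElem
  · simp; omega
  · intro n h₁ h₂
    simp only [List.getElem_take, List.getElem_drop]
    have hn : n < 3 := by simpa using h₂
    interval_cases n <;> simp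

theorem pvCond_natCast (s : String) (k : Nat) (hk : k + 2 < s.toList.length) :
    pvCond s (k : Int) =
      (s.toList[k]'(by omega) == s.toList[k+2]'(by omega) &&
        !(s.toList[k]'(by omega) == s.toList[k+1]'(by omega))) := by
  unfold pvCond
  rw [PySem.Str.toList_slice, PySem.Chars.slice_eq_listSlice, window_eq _ _ hk]

theorem pvTgt_natCast (s : String) (k : Nat) (hk : k + 2 < s.toList.length) :
    pvTgt s (k : Int) =
      String.ofList [s.toList[k+1]'(by omega), s.toList[k]'(by omega), s.toList[k+1]'(by omega)] := by
  unfold pvTgt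
  rw [PySem.Str.toList_slice, PySem.Chars.slice_eq_listSlice, window_eq _ _ hk]

theorem zip_getElem (L : List Char) (k : Nat) (hk : k + 2 < L.length) :
    ∃ h : k < ((L.zip (L.drop 1)).zip (L.drop 2)).length,
      ((L.zip (L.drop 1)).zip (L.drop 2))[k]'h =
        ((L[k]'(by omega), L[k+1]'(by omega)), L[k+2]'(by omega)) := by
  refine ⟨by simp [List.length_zip, List.length_drop]; omega, ?_⟩
  have h1 : 1 + k = k + 1 := by omega
  have h2 : 2 + k = k + 2 := by omega
  simp only [List.getElem_zip, List.getElem_drop, h1, h2]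

theorem zipMem_iff (s : String) (t : String) :
    (∃ p ∈ (s.toList.zip (PySem.Str.slice s (some 1) none).toList).zip
          (PySem.Str.slice s (some 2) none).toList,
        (p.1.1 == p.2 && !(p.1.1 == p.1.2)) = true ∧ String.ofList [p.1.2, p.1.1, p.1.2] = t)
    ↔ ∃ i ∈ PySem.List.pyRange 0 (PySem.Str.len s - 2) 1, pvCond s i = true ∧ pvTgt s i = t := by
  have e1 : (PySem.Str.slice s (some 1) none).toList = s.toList.drop 1 := by
    rw [PySem.Str.toList_slice, PySem.Chars.slice_eq_listSlice,
        PySem.List.slice_from _ (by norm_num)]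
    simp
  have e2 : (PySem.Str.slice s (some 2) none).toList = s.toList.drop 2 := by
    rw [PySem.Str.toList_slice, PySem.Chars.slice_eq_listSlice,
        PySem.List.slice_from _ (by norm_num)]
    simp
  rw [e1, e2]
  constructor
  · rintro ⟨p, hp, hq, hf⟩
    rw [List.mem_iff_getElem] at hp
    obtain ⟨k, hk, hpk⟩ := hp
    have hklt : k + 2 < s.toList.length := by
      simp only [List.length_zip, List.length_drop] at hk; omega
    obtain ⟨hz, hze⟩ := zip_getElem s.toList k hklt
    have hpe : p = ((s.toList[k]'(by omega), s.toList[k+1]'(by omega)), s.toList[k+2]'(by omega)) := by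
      rw [← hpk]; exact hze
    refine ⟨(k : Int), ?_, ?_, ?_⟩
    · rw [PySem.List.mem_pyRange_one, PySem.Str.len_eq]
      constructor
      · exact Int.natCast_nonneg _
      · omega
    · rw [pvCond_natCast s k hklt]
      rw [hpe] at hq
      exact hq
    · rw [pvTgt_natCast s k hklt]
      rw [hpe] at hf
      exact hf
  · rintro ⟨i, hi, hc, hf⟩
    rw [PySem.List.mem_pyRange_one, PySem.Str.len_eq] at hi
    obtain ⟨hi0, hi2⟩ := hi
    have hik : i = (i.toNat : Int) := (Int.toNat_of_nonneg hi0).symm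
    have hklt : i.toNat + 2 < s.toList.length := by omega
    obtain ⟨hz, hze⟩ := zip_getElem s.toList i.toNat hklt
    refine ⟨((s.toList[i.toNat]'(by omega), s.toList[i.toNat+1]'(by omega)),
              s.toList[i.toNat+2]'(by omega)), ?_, ?_, ?_⟩
    · rw [List.mem_iff_getElem]
      exact ⟨i.toNat, hz, hze⟩
    · rw [hik, pvCond_natCast s i.toNat hklt] at hc
      exact hc
    · rw [hik, pvTgt_natCast s i.toNat hklt] at hf
      exact hf

theorem hgB (s : String) (T : PySem.Set String) (t : String) :
    t ∈ ((s.toList.zip (PySem.Str.slice s (some 1) none).toList).zip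
          (PySem.Str.slice s (some 2) none).toList).foldl
        (fun T p =>
          if p.1.1 == p.2 && !(p.1.1 == p.1.2) then
            T.add (String.ofList [p.1.2, p.1.1, p.1.2])
          else T) T
    ↔ t ∈ T ∨ ∃ i ∈ PySem.List.pyRange 0 (PySem.Str.len s - 2) 1,
        pvCond s i = true ∧ pvTgt s i = t :=
  (pv_mem_foldl_addIf _ _
      (fun p : (Char × Char) × Char => p.1.1 == p.2 && !(p.1.1 == p.1.2))
      (fun p : (Char × Char) × Char => String.ofList [p.1.2, p.1.1, p.1.2])
      (fun _ _ => rfl) T t).trans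
    (or_congr_right (zipMem_iff s t))

theorem B_true_iff (sq sqrt : List String) :
    listenor_alt sq sqrt = true ↔
      ∃ ss ∈ sqrt, ∃ j ∈ PySem.List.pyRange 0 (PySem.Str.len ss - 2) 1,
        ∃ s ∈ sq, ∃ i ∈ PySem.List.pyRange 0 (PySem.Str.len s - 2) 1,
          pvCond s i = true ∧ pvTgt s i = PySem.Str.slice ss (some j) (some (j + 3)) := by
  unfold listenor_alt
  simp only [List.any_eq_true, PySem.Set.contains_iff]
  refine exists_congr fun ss => and_congr_right fun _ =>
    exists_congr fun j => and_congr_right fun _ => ?_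
  rw [pv_mem_foldl_union _ _
        (fun s t => ∃ i ∈ PySem.List.pyRange 0 (PySem.Str.len s - 2) 1,
          pvCond s i = true ∧ pvTgt s i = t)
        (fun T s t => hgB s T t)]
  simp [PySem.Set.empty]

theorem infix_three (C L : List Char) (hC : C.length = 3) :
    C <:+: L ↔ ∃ j ∈ PySem.List.pyRange 0 ((L.length : Int) - 2) 1,
      PySem.List.slice L (some j) (some (j + 3)) = C := by
  constructor
  · rintro ⟨u, v, rfl⟩
    refine ⟨(u.length : Int), ?_, ?_⟩
    · rw [PySem.List.mem_pyRange_one]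
      have hlen : (u ++ C ++ v).length = u.length + 3 + v.length := by
        simp [List.length_append, hC]; omega
      constructor
      · exact Int.natCast_nonneg _
      · rw [hlen]; push_cast; omega
    · rw [PySem.List.slice_toNat _ (Int.natCast_nonneg _) (by positivity)]
      have h1 : ((u.length : Int)).toNat = u.length := Int.toNat_natCast _
      have h2 : ((u.length : Int) + 3).toNat = u.length + 3 := by omega
      rw [h1, h2]
      have h3 : u.length + 3 - u.length = 3 := by omega
      rw [h3, List.append_assoc, List.drop_left, ← hC, List.take_left]
  · rintro ⟨j, hj, hsl⟩
    rw [PySem.List.mem_pyRange_one] at hj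
    rw [PySem.List.slice_toNat _ hj.1 (by omega)] at hsl
    have hpre : C <+: L.drop j.toNat := hsl ▸ List.take_prefix _ _
    exact hpre.isInfix.trans (List.drop_suffix _ _).isInfix

theorem isIn_three (t ss : String) (ht : t.toList.length = 3) :
    PySem.Str.isIn t ss = true ↔
      ∃ j ∈ PySem.List.pyRange 0 (PySem.Str.len ss - 2) 1,
        PySem.Str.slice ss (some j) (some (j + 3)) = t := by
  rw [PySem.Str.isIn_iff_infix, infix_three _ _ ht, PySem.Str.len_eq]
  refine exists_congr fun j => and_congr_right fun _ => ?_
  rw [← String.toList_inj, PySem.Str.toList_slice, PySem.Chars.slice_eq_listSlice]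

-- ===== VERDICT (by name: the statement is the Claim_ definition above) =====
theorem listenor_spec : Claim_equal_listenor := by
  intro sq sqrt _
  show listenor sq sqrt = listenor_alt sq sqrt
  have hiff : listenor sq sqrt = true ↔ listenor_alt sq sqrt = true := by
    rw [A_true_iff, B_true_iff]
    constructor
    · rintro ⟨s, hs, i, hi, hc, ss, hss, hin⟩
      obtain ⟨j, hj, hsl⟩ := (isIn_three _ _ (length_pvTgt s i hc)).1 hin
      exact ⟨ss, hss, j, hj, s, hs, i, hi, hc, hsl.symm⟩
    · rintro ⟨ss, hss, j, hj, s, hs, i, hi, hc, hsl⟩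
      exact ⟨s, hs, i, hi, hc, ss, hss, (isIn_three _ _ (length_pvTgt s i hc)).2 ⟨j, hj, hsl.symm⟩⟩
  cases hA : listenor sq sqrt with
  | true => exact (hiff.mp hA).symm
  | false =>
    cases hB : listenor_alt sq sqrt with
    | true => exact absurd (hiff.mpr hB) (by simp [hA])
    | false => rfl
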